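-- pv_equiv track=rewrite | github.com/AKIB473/medicrawl | utils/merger.py | pick_best
-- ===== SOURCE A (Python) =====
-- def pick_best(
--     values: list[str],
--     priority_sources: list[str],
--     source_map: dict[str, str],
-- ) -> str | None:
--     """
--     Choose the most informative non-empty string from ``values``.
--
--     Selection strategy:
--
--     1. Prefer values whose source appears in ``priority_sources`` (in priority
--        order).
--     2. Among equal-priority candidates, prefer the longest value (more detail).
--     3. Fall back to the longest value regardless of source.
--
--     Parameters
--     ----------
--     values:
--         Candidate string values.
--     priority_sources:
--         Ordered list of source names to prefer (highest priority first).
--     source_map: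
--         Maps each value to its originating source name.
--
--     Returns
--     -------
--     str | None
--         The best value, or ``None`` if no non-empty candidates exist.
--     """
--     non_empty = [v for v in values if v and v.strip()]
--     if not non_empty:
--         return None
--     # Build (priority_rank, -length, value) tuples; missing sources get rank=∞
--     source_rank = {s: i for i, s in enumerate(priority_sources)}
--     ranked = sorted(
--         non_empty,
--         key=lambda v: (
--             source_rank.get(source_map.get(v, ''), len(priority_sources)),
--             -len(v),
--         ),
--     )
--     return ranked[0]
-- ===== SOURCE B (Python) =====
-- def pick_best(
--     values: list[str],
--     priority_sources: list[str],
--     source_map: dict[str, str],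
-- ) -> str | None:
--     """Single-pass selection: keep the running best candidate instead of sorting."""
--     rank = {s: i for i, s in enumerate(priority_sources)}
--     fallback = len(priority_sources)
--     best = None
--     for v in values:
--         if not (v and v.strip()):
--             continue
--         if best is None:
--             best = v
--             continue
--         rv = rank.get(source_map.get(v, ''), fallback)
--         rb = rank.get(source_map.get(best, ''), fallback)
--         if rv < rb or (rv == rb and len(v) > len(best)):
--             best = v
--     return best
-- ===== Notes on version B (the rewrite author's own statement) =====
-- stated objective: faster
-- what changed: Replaces build-list-then-stable-sort-and-take-head with a single left-to-right pass that keeps the running best candidate (strictly-better comparison preserves first-on-ties).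
import Mathlib
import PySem

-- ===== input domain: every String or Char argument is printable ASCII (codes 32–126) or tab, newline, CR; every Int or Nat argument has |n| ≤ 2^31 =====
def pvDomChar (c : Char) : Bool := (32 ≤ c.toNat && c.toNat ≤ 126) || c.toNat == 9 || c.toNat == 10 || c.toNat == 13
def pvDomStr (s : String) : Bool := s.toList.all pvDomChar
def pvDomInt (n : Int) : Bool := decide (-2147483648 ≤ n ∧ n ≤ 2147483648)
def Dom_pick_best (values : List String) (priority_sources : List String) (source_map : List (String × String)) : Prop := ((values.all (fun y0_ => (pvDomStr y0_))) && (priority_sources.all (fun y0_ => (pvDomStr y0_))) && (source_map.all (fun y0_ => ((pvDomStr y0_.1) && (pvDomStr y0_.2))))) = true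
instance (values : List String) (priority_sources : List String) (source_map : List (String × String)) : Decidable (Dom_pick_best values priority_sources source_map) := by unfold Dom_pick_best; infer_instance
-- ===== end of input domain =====

-- B replaces A's build-list / stable-sort / take-head by a single left-to-right pass keeping the
-- running best candidate (objective: faster — one pass, no intermediate sorted list).

-- shared key helpers: both Pythons compute the same key expressions
-- source_rank = {s: i for i, s in enumerate(priority_sources)}
def pbRankDict (priority_sources : List String) : PySem.Dict String Int :=
  (PySem.List.enumerate priority_sources 0).foldl (fun d p => d.insert p.2 p.1) PySem.Dict.empty

-- source_rank.get(source_map.get(v, ''), len(priority_sources))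
def pbKey1 (priority_sources : List String) (source_map : List (String × String)) (v : String) : Int :=
  (pbRankDict priority_sources).getD ((PySem.Dict.mk source_map).getD v "") (priority_sources.length : Int)

-- ===== PORT A =====
def pick_best (values : List String) (priority_sources : List String) (source_map : List (String × String)) : Option String :=
  let non_empty := values.filter (fun v => !(v == "") && !(PySem.Str.strip v == ""))
  if non_empty = [] then none
  else
    let ranked := PySem.List.sorted2 non_empty
      (fun v => pbKey1 priority_sources source_map v)
      (fun v => -(PySem.Str.len v))
    ranked.head?   -- `return ranked[0]`: non_empty ≠ [] so index 0 is in range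

-- ===== PORT B =====
def pick_best_alt (values : List String) (priority_sources : List String) (source_map : List (String × String)) : Option String :=
  values.foldl (fun best v =>
    if !(v == "") && !(PySem.Str.strip v == "") then
      match best with
      | none => some v
      | some b =>
        if pbKey1 priority_sources source_map v < pbKey1 priority_sources source_map b ∨
           (pbKey1 priority_sources source_map v = pbKey1 priority_sources source_map b ∧
            PySem.Str.len b < PySem.Str.len v) then some v else some b
    else best) none

-- ===== PRECONDITION & SPEC =====
def Spec_pick_best (values : List String) (priority_sources : List String) (source_map : List (String × String)) (out : Option String) : Prop := out = pick_best_alt values priority_sources source_map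
instance (values : List String) (priority_sources : List String) (source_map : List (String × String)) (out : Option String) : Decidable (Spec_pick_best values priority_sources source_map out) := by unfold Spec_pick_best; infer_instance

-- ===== CLAIM (what is proved, stated in full; the proofs are below) =====
def Claim_equal_pick_best : Prop := ∀ (values : List String) (priority_sources : List String) (source_map : List (String × String)), Dom_pick_best values priority_sources source_map → Spec_pick_best values priority_sources source_map (pick_best values priority_sources source_map)

-- ===== LEMMAS AND PROOFS =====

-- one step of the running-min fold, parametrised by the sort's `before` comparison
def pbStep {α : Type} (before : α → α → Bool) (o : Option α) (x : α) : Option α :=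
  match o with
  | none => some x
  | some m => if before x m then some x else some m

theorem head?_insertBy {α : Type} (before : α → α → Bool) (x : α) (acc : List α) :
    (PySem.List.insertBy before x acc).head? = pbStep before acc.head? x := by
  cases acc with
  | nil => rfl
  | cons m t =>
    simp only [PySem.List.insertBy, pbStep, List.head?]
    split_ifs <;> rfl

-- the head of a stable insertion sort is the running strict minimum
theorem head?_foldl_insertBy {α : Type} (before : α → α → Bool) (l : List α) (acc : List α) :
    (l.foldl (fun a x => PySem.List.insertBy before x a) acc).head? =
      l.foldl (pbStep before) acc.head? := by
  induction l generalizing acc with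
  | nil => rfl
  | cons x t ih =>
    simp only [List.foldl]
    rw [ih, head?_insertBy]

-- ===== VERDICT (by name: the statement is the Claim_ definition above) =====
theorem pick_best_spec : Claim_equal_pick_best := by
  intro values priority_sources source_map _
  unfold Spec_pick_best pick_best pick_best_alt
  set k1 : String → Int := fun v => pbKey1 priority_sources source_map v with hk1
  set ne := values.filter (fun v => !(v == "") && !(PySem.Str.strip v == "")) with hne
  have hB : (values.foldl (fun best v =>
      if !(v == "") && !(PySem.Str.strip v == "") then
        (match best with
        | none => some v
        | some b => if k1 v < k1 b ∨ (k1 v = k1 b ∧ PySem.Str.len b < PySem.Str.len v)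
                    then some v else some b)
      else best) none) =
      ne.foldl (pbStep (fun a b => decide (k1 a < k1 b) || !decide (k1 b < k1 a) &&
        decide (-(PySem.Str.len a) < -(PySem.Str.len b)))) none := by
    rw [hne, ← PySem.List.foldl_if_eq_foldl_filter]
    apply PySem.List.foldl_congr_mem
    intro best v _
    by_cases h : (!(v == "") && !(PySem.Str.strip v == "")) = true
    · simp only [h, if_true]
      cases best with
      | none => rfl
      | some b =>
        simp only [pbStep]
        have hiff : (k1 v < k1 b ∨ (k1 v = k1 b ∧ PySem.Str.len b < PySem.Str.len v)) ↔
            (decide (k1 v < k1 b) || !decide (k1 b < k1 v) &&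
              decide (-(PySem.Str.len v) < -(PySem.Str.len b))) = true := by
          simp only [Bool.or_eq_true, Bool.and_eq_true, Bool.not_eq_true',
            decide_eq_true_eq, decide_eq_false_iff_not]
          omega
        exact if_congr hiff rfl rfl
    · simp [h]
  rw [hB]
  by_cases h : ne = []
  · simp [h]
  · simp only [h, if_false]
    have := head?_foldl_insertBy
      (fun a b => decide (k1 a < k1 b) || !decide (k1 b < k1 a) &&
        decide (-(PySem.Str.len a) < -(PySem.Str.len b))) ne []
    simpa [PySem.List.sorted2] using this
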